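-- pv_equiv track=rewrite | github.com/alievalibot/harbour.space | lectures/01/exercises/problems.py | sum_until_negative
-- ===== SOURCE A (Python) =====
-- def sum_until_negative(numbers: list[int]) -> int:
--     result = 0
--     for i in range(len(numbers)):
--         if numbers[i] >= 0:
--             result += numbers[i]
--         else:
--             break
--     return result
--     """Return sum of numbers until the first negative value (exclusive)."""
--     raise NotImplementedError
-- ===== SOURCE B (Python) =====
-- def sum_until_negative(numbers: list[int]) -> int:
--     idx = next((i for i, x in enumerate(numbers) if x < 0), len(numbers))
--     return sum(numbers[:idx])
-- ===== Notes on version B (the rewrite author's own statement) =====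
-- stated objective: alternative
-- what changed: B splits the task into two passes: it first finds the index of the first negative element (defaulting to len), then sums the prefix slice before it, instead of A's single fused accumulator loop with break.
import Mathlib
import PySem

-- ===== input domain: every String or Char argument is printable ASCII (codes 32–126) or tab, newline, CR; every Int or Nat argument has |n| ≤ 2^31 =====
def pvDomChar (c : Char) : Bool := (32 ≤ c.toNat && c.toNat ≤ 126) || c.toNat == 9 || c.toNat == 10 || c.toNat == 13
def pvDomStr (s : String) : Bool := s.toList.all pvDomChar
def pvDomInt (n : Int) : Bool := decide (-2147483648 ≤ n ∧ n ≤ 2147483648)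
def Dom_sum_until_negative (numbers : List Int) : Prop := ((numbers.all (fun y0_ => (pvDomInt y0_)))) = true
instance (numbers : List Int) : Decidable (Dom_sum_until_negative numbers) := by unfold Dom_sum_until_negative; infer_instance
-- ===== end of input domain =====

-- B finds the cutoff index first, then sums the prefix; A fuses scan and sum in one loop with break.

-- ===== PORT A =====
-- A's indexed loop with break, as structural recursion carrying the running sum.
def sumUntilNegLoop (numbers : List Int) (result : Int) : Int :=
  match numbers with
  | [] => result
  | x :: xs => if x ≥ 0 then sumUntilNegLoop xs (result + x) else result

def sum_until_negative (numbers : List Int) : Int :=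
  sumUntilNegLoop numbers 0

-- ===== PORT B =====
-- index of the first negative element, or the length if none (the `next(..., len(numbers))`)
def firstNegIdx (numbers : List Int) : Nat :=
  match numbers with
  | [] => 0
  | x :: xs => if x < 0 then 0 else 1 + firstNegIdx xs

def sum_until_negative_alt (numbers : List Int) : Int :=
  ((PySem.List.slice numbers none (some (Int.ofNat (firstNegIdx numbers)))).foldl (· + ·) 0)

-- ===== PRECONDITION & SPEC =====
def Spec_sum_until_negative (numbers : List Int) (out : Int) : Prop := out = sum_until_negative_alt numbers
instance (numbers : List Int) (out : Int) : Decidable (Spec_sum_until_negative numbers out) := by unfold Spec_sum_until_negative; infer_instance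

-- ===== CLAIM (what is proved, stated in full; the proofs are below) =====
def Claim_equal_sum_until_negative : Prop := ∀ (numbers : List Int), Dom_sum_until_negative numbers → Spec_sum_until_negative numbers (sum_until_negative numbers)

-- ===== LEMMAS AND PROOFS =====
theorem slice_to_natCast (l : List Int) (n : Nat) :
    PySem.List.slice l none (some (Int.ofNat n)) = l.take n := by
  simpa using PySem.List.slice_to (xs := l) (j := n)

theorem foldl_add_shift (l : List Int) (a : Int) :
    l.foldl (· + ·) a = a + l.foldl (· + ·) 0 := by
  induction l generalizing a with
  | nil => simp
  | cons x xs ih =>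
    simp only [List.foldl]
    rw [ih (a + x), ih (0 + x)]
    ring

theorem loop_eq (l : List Int) (a : Int) :
    sumUntilNegLoop l a = a + (l.take (firstNegIdx l)).foldl (· + ·) 0 := by
  induction l generalizing a with
  | nil => simp [sumUntilNegLoop, firstNegIdx]
  | cons x xs ih =>
    by_cases h : x ≥ 0
    · have hneg : ¬ x < 0 := by omega
      simp only [sumUntilNegLoop, firstNegIdx, if_pos h, if_neg hneg,
        Nat.add_comm 1, List.take_succ_cons, List.foldl]
      rw [ih (a + x), foldl_add_shift _ (0 + x)]
      ring
    · have hneg : x < 0 := by omega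
      have h' : ¬ x ≥ 0 := by omega
      simp [sumUntilNegLoop, firstNegIdx, if_neg h', if_pos hneg]

-- ===== VERDICT (by name: the statement is the Claim_ definition above) =====
theorem sum_until_negative_spec : Claim_equal_sum_until_negative := by
  intro numbers _
  unfold Spec_sum_until_negative sum_until_negative sum_until_negative_alt
  rw [slice_to_natCast, loop_eq]
  ring
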